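-- pv_equiv track=rewrite | github.com/dragana-u/AI | Zadaci_Vezbanje/15/trudovi.py | only_four
-- ===== SOURCE A (Python) =====
-- def only_four(tr1, tr2, tr3, tr4, tr5, tr6, tr7, tr8, tr9, tr10):
--     term1 = 0
--     term2 = 0
--     term3 = 0
--     term4 = 0
--
--     terms = [tr1, tr2, tr3, tr4, tr5, tr6, tr7, tr8, tr9, tr10]
--
--     for term in terms:
--         if term == "T1":
--             term1 += 1
--         if term == "T2":
--             term2 += 1
--         if term == "T3":
--             term3 += 1
--         if term == "T4":
--             term4 += 1
--     return term1 <= 4 and term2 <= 4 and term3 <= 4 and term4 <= 4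
-- ===== SOURCE B (Python) =====
-- def only_four(tr1, tr2, tr3, tr4, tr5, tr6, tr7, tr8, tr9, tr10):
--     return _within_limit([tr1, tr2, tr3, tr4, tr5, tr6, tr7, tr8, tr9, tr10])
--
-- def _within_limit(terms):
--     # Recursive partition: strip every copy of the head, read its multiplicity
--     # off the length drop, then recurse on the residue (each value checked once).
--     if not terms:
--         return True
--     head = terms[0]
--     rest = [t for t in terms if t != head]
--     if head in ("T1", "T2", "T3", "T4") and len(terms) - len(rest) > 4:
--         return False
--     return _within_limit(rest)
-- ===== Notes on version B (the rewrite author's own statement) =====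
-- stated objective: alternative
-- what changed: Replaces A's single-pass four-counter tally over the fixed list with a recursive partition: strip all copies of the current head, obtain its multiplicity from the length drop, and recurse on the shrinking residue.
import Mathlib
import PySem

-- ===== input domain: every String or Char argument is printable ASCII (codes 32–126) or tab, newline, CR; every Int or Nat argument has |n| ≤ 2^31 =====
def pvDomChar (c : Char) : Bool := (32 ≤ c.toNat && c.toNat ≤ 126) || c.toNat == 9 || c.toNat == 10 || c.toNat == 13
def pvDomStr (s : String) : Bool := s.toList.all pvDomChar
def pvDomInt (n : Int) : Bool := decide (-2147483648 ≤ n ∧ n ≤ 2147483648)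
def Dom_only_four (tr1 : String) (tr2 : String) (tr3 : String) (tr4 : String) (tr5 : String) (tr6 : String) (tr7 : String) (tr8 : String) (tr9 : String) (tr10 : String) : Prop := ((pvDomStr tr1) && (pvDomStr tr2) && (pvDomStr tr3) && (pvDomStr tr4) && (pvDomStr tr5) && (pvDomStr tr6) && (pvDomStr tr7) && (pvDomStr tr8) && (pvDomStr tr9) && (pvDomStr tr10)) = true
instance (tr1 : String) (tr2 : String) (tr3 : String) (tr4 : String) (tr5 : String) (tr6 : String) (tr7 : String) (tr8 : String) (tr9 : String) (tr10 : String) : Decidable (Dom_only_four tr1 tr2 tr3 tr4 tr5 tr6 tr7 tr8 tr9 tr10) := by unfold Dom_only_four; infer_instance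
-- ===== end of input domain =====

-- B replaces A's single-pass four-counter tally with a recursive partition (strip all
-- copies of the head, read its multiplicity off the length drop, recurse on the residue);
-- objective: alternative.

-- ===== PORT A =====
-- A's single for-loop: one pass maintaining the four counters (term1, term2, term3, term4)
def only_four_loop (terms : List String) (st : Int × Int × Int × Int) : Int × Int × Int × Int :=
  terms.foldl (fun st term =>
    let st := if term == "T1" then (st.1 + 1, st.2.1, st.2.2.1, st.2.2.2) else st
    let st := if term == "T2" then (st.1, st.2.1 + 1, st.2.2.1, st.2.2.2) else st
    let st := if term == "T3" then (st.1, st.2.1, st.2.2.1 + 1, st.2.2.2) else st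
    let st := if term == "T4" then (st.1, st.2.1, st.2.2.1, st.2.2.2 + 1) else st
    st) st

def only_four (tr1 : String) (tr2 : String) (tr3 : String) (tr4 : String) (tr5 : String) (tr6 : String) (tr7 : String) (tr8 : String) (tr9 : String) (tr10 : String) : Bool :=
  let terms := [tr1, tr2, tr3, tr4, tr5, tr6, tr7, tr8, tr9, tr10]
  let st := only_four_loop terms (0, 0, 0, 0)
  st.1 ≤ 4 && st.2.1 ≤ 4 && st.2.2.1 ≤ 4 && st.2.2.2 ≤ 4

-- ===== PORT B =====
-- Source B's _within_limit: the comprehension [t for t in terms if t != head] is the filter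
-- (the head itself never passes its own ≠-test, so filtering the tail is the same list);
-- len(terms) - len(rest) is the Int subtraction of the two lengths.
def within_limit : List String → Bool
  | [] => true
  | h :: t =>
    let rest := List.filter (fun x => !(x == h)) t
    let n : Int := ((h :: t).length : Int) - (rest.length : Int)
    if (h == "T1" || h == "T2" || h == "T3" || h == "T4") && n > 4 then false
    else within_limit rest
termination_by l => l.length
decreasing_by
  have hle := List.length_filter_le (fun (x : {x // x ∈ t}) => !((x : String) == h)) t.attach
  simp at hle ⊢
  omega

def only_four_alt (tr1 : String) (tr2 : String) (tr3 : String) (tr4 : String) (tr5 : String) (tr6 : String) (tr7 : String) (tr8 : String) (tr9 : String) (tr10 : String) : Bool :=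
  within_limit [tr1, tr2, tr3, tr4, tr5, tr6, tr7, tr8, tr9, tr10]

-- ===== PRECONDITION & SPEC =====
def Spec_only_four (tr1 : String) (tr2 : String) (tr3 : String) (tr4 : String) (tr5 : String) (tr6 : String) (tr7 : String) (tr8 : String) (tr9 : String) (tr10 : String) (out : Bool) : Prop := out = only_four_alt tr1 tr2 tr3 tr4 tr5 tr6 tr7 tr8 tr9 tr10
instance (tr1 : String) (tr2 : String) (tr3 : String) (tr4 : String) (tr5 : String) (tr6 : String) (tr7 : String) (tr8 : String) (tr9 : String) (tr10 : String) (out : Bool) : Decidable (Spec_only_four tr1 tr2 tr3 tr4 tr5 tr6 tr7 tr8 tr9 tr10 out) := by unfold Spec_only_four; infer_instance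

-- ===== CLAIM (what is proved, stated in full; the proofs are below) =====
def Claim_equal_only_four : Prop := ∀ (tr1 : String) (tr2 : String) (tr3 : String) (tr4 : String) (tr5 : String) (tr6 : String) (tr7 : String) (tr8 : String) (tr9 : String) (tr10 : String), Dom_only_four tr1 tr2 tr3 tr4 tr5 tr6 tr7 tr8 tr9 tr10 → Spec_only_four tr1 tr2 tr3 tr4 tr5 tr6 tr7 tr8 tr9 tr10 (only_four tr1 tr2 tr3 tr4 tr5 tr6 tr7 tr8 tr9 tr10)

-- ===== LEMMAS AND PROOFS =====
-- invariant of A's loop: it adds each label's count to the corresponding accumulator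
theorem only_four_loop_eq (terms : List String) (st : Int × Int × Int × Int) :
    only_four_loop terms st =
      (st.1 + terms.count "T1", st.2.1 + terms.count "T2",
       st.2.2.1 + terms.count "T3", st.2.2.2 + terms.count "T4") := by
  induction terms generalizing st with
  | nil => simp [only_four_loop]
  | cons t ts ih =>
    simp only [only_four_loop, List.foldl_cons] at *
    rw [ih]
    by_cases h1 : t = "T1" <;> by_cases h2 : t = "T2" <;> by_cases h3 : t = "T3"
      <;> by_cases h4 : t = "T4" <;>
      simp_all <;> ring

-- counts split at a filter: elements equal to h versus the rest
theorem length_filter_not_eq (h : String) (t : List String) :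
    (List.filter (fun x => !(x == h)) t).length + t.count h = t.length := by
  induction t with
  | nil => simp
  | cons x xs ih =>
    by_cases hx : x = h <;> simp [List.filter_cons, List.count_cons, hx] <;> omega

theorem count_filter_ne (h a : String) (t : List String) (hne : a ≠ h) :
    (List.filter (fun x => !(x == h)) t).count a = t.count a :=
  List.count_filter (by simp [hne])

theorem count_filter_self (h : String) (t : List String) :
    (List.filter (fun x => !(x == h)) t).count h = 0 := by
  rw [List.count_eq_zero]
  intro hmem
  simpa using (List.of_mem_filter hmem)

-- characterisation of B's recursion: true iff every one of the four labels occurs ≤ 4 times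
theorem within_limit_eq : ∀ (n : ℕ) (l : List String), l.length ≤ n →
    within_limit l =
      (decide (l.count "T1" ≤ 4) && decide (l.count "T2" ≤ 4)
        && decide (l.count "T3" ≤ 4) && decide (l.count "T4" ≤ 4)) := by
  intro n
  induction n with
  | zero =>
    intro l hl
    have : l = [] := List.eq_nil_of_length_eq_zero (Nat.le_zero.mp hl)
    subst this; simp [within_limit]
  | succ n ih =>
    intro l hl
    cases l with
    | nil => simp [within_limit]
    | cons h t =>
      rw [within_limit]
      have hrest := length_filter_not_eq h t
      have hlen : (List.filter (fun x => !(x == h)) t).length ≤ n := by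
        simp at hl; omega
      rw [ih _ hlen]
      have hcf : ∀ a : String, (List.filter (fun x => !(x == h)) t).count a
          = if a = h then 0 else t.count a := by
        intro a; by_cases ha : a = h
        · subst ha; simp [count_filter_self]
        · simp [ha, count_filter_ne h a t ha]
      have hn : ((h :: t).length : Int) -
          ((List.filter (fun x => !(x == h)) t).length : Int) = ((t.count h : Int) + 1) := by
        simp; push_cast; omega
      simp only [hcf, hn]
      by_cases h1 : h = "T1" <;> by_cases h2 : h = "T2" <;> by_cases h3 : h = "T3"
        <;> by_cases h4 : h = "T4" <;>
        simp_all [List.count_cons] <;>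
        first
          | (rw [Bool.eq_iff_iff]; simp; omega)
          | (rw [Bool.eq_iff_iff]; split_ifs <;> simp_all <;> omega)

-- ===== VERDICT (by name: the statement is the Claim_ definition above) =====
theorem only_four_spec : Claim_equal_only_four := by
  intro tr1 tr2 tr3 tr4 tr5 tr6 tr7 tr8 tr9 tr10 _
  unfold Spec_only_four only_four only_four_alt
  dsimp only
  rw [only_four_loop_eq, within_limit_eq 10 _ (by simp)]
  rw [Bool.eq_iff_iff]
  simp only [Bool.and_eq_true, decide_eq_true_eq]
  push_cast
  omega
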